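-- pv_equiv track=rewrite | github.com/rasmith81-live/AnalyticsEngine | services/business_services/analytics_metadata_service/definitions/update_all_object_models_comprehensive.py | get_related_objects
-- ===== SOURCE A (Python) =====
-- def get_related_objects(obj_name, analysis_results):
--     """Get objects that appear together in KPIs."""
--     related = set()
--
--     if obj_name not in analysis_results:
--         return []
--
--     # Get KPIs that reference this object
--     obj_kpis = set(kpi['code'] for kpi in analysis_results[obj_name]['kpis'])
--
--     # Find other objects that appear in the same KPIs
--     for other_obj, data in analysis_results.items():
--         if other_obj != obj_name:
--             other_kpis = set(kpi['code'] for kpi in data['kpis'])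
--             # If they share KPIs, they're related
--             if obj_kpis & other_kpis:  # Intersection
--                 related.add(other_obj)
--
--     # Limit to top 20 most frequently co-occurring
--     return sorted(list(related))[:20]
-- ===== SOURCE B (Python) =====
-- def get_related_objects(obj_name, analysis_results):
--     """Get objects that appear together in KPIs (inverted-index version)."""
--     if obj_name not in analysis_results:
--         return []
--
--     # Inverted index: kpi code -> set of objects whose kpis carry that code
--     index = {}
--     for obj, data in analysis_results.items():
--         for kpi in data['kpis']:
--             index.setdefault(kpi['code'], set()).add(obj)
--
--     related = set()
--     for kpi in analysis_results[obj_name]['kpis']: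
--         related |= index.get(kpi['code'], set())
--     related.discard(obj_name)
--
--     return sorted(related)[:20]
-- ===== Notes on version B (the rewrite author's own statement) =====
-- stated objective: alternative
-- what changed: Replaces the per-object set-intersection scan with an inverted index from KPI code to objects, built once and then unioned over the query object's codes (discarding the object itself).
import Mathlib
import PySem

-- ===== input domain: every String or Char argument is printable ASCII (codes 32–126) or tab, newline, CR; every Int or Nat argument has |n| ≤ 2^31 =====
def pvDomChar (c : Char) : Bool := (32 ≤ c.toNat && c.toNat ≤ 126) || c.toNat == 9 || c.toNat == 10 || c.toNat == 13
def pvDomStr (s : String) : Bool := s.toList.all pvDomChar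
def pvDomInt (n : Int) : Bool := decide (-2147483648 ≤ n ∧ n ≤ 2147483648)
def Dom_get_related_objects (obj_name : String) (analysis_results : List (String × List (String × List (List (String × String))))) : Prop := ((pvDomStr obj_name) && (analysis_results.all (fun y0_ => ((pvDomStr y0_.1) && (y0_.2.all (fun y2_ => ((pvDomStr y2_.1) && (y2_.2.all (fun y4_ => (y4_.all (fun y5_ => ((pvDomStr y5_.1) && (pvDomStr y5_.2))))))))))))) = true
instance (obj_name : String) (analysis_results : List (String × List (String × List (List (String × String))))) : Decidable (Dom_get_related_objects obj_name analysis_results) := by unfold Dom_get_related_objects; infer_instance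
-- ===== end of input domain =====

-- B replaces the per-object intersection scan with an inverted index (KPI code -> objects),
-- then unions the index entries of the query object's codes; same result, alternative algorithm.

-- ===== PORT A =====
-- set(kpi['code'] for kpi in data['kpis']); under Pre_ the 'kpis'/'code' lookups succeed,
-- so getD with a default is exact there.
def kpiCodes (data : List (String × List (List (String × String)))) : PySem.Set String :=
  PySem.Set.ofList
    (((PySem.Dict.ofList data).getD "kpis" []).map
      (fun kpi => (PySem.Dict.ofList kpi).getD "code" ""))

def get_related_objects (obj_name : String) (analysis_results : List (String × List (String × List (List (String × String))))) : List String :=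
  let d := PySem.Dict.ofList analysis_results
  if d.contains obj_name = false then []
  else
    let obj_kpis := kpiCodes (d.getD obj_name [])
    let related := d.items.foldl
      (fun related p =>
        if p.1 ≠ obj_name then
          if PySem.Set.inter obj_kpis (kpiCodes p.2) = [] then related
          else PySem.Set.add related p.1
        else related)
      PySem.Set.empty
    -- sorted(list(related))[:20]  ([:20] on a list is take 20)
    (PySem.List.sorted related (fun x => x) false).take 20

-- ===== PORT B =====
def get_related_objects_alt (obj_name : String) (analysis_results : List (String × List (String × List (List (String × String))))) : List String :=
  let d := PySem.Dict.ofList analysis_results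
  if d.contains obj_name = false then []
  else
    -- index.setdefault(kpi['code'], set()).add(obj)
    let index := d.items.foldl
      (fun idx p =>
        ((PySem.Dict.ofList p.2).getD "kpis" []).foldl
          (fun idx kpi =>
            idx.modify ((PySem.Dict.ofList kpi).getD "code" "") []
              (fun s => PySem.Set.add s p.1))
          idx)
      (PySem.Dict.empty : PySem.Dict String (PySem.Set String))
    -- related |= index.get(kpi['code'], set())
    let related := ((PySem.Dict.ofList (d.getD obj_name [])).getD "kpis" []).foldl
      (fun rel kpi => PySem.Set.union rel (index.getD ((PySem.Dict.ofList kpi).getD "code" "") []))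
      PySem.Set.empty
    let related := PySem.Set.discard related obj_name
    (PySem.List.sorted related (fun x => x) false).take 20

-- ===== PRECONDITION & SPEC =====
-- Pre_ excludes exactly the inputs where A raises KeyError: when the queried object is
-- present, every object's dict must have a 'kpis' key and every kpi dict a 'code' key.
def Pre_get_related_objects (obj_name : String) (analysis_results : List (String × List (String × List (List (String × String))))) : Prop :=
  (PySem.Dict.ofList analysis_results).contains obj_name = true →
    ((PySem.Dict.ofList analysis_results).items.all
      (fun p => (PySem.Dict.ofList p.2).contains "kpis" &&
        ((PySem.Dict.ofList p.2).getD "kpis" []).all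
          (fun kpi => (PySem.Dict.ofList kpi).contains "code"))) = true
instance (obj_name : String) (analysis_results : List (String × List (String × List (List (String × String))))) : Decidable (Pre_get_related_objects obj_name analysis_results) := by unfold Pre_get_related_objects; infer_instance

def pvWitness_get_related_objects : String × (List (String × List (String × List (List (String × String))))) :=
  ("a", [("a", [("kpis", [[("code", "k1")]])]), ("b", [("kpis", [[("code", "k1")]])])])

def Spec_get_related_objects (obj_name : String) (analysis_results : List (String × List (String × List (List (String × String))))) (out : List String) : Prop := out = get_related_objects_alt obj_name analysis_results
instance (obj_name : String) (analysis_results : List (String × List (String × List (List (String × String))))) (out : List String) : Decidable (Spec_get_related_objects obj_name analysis_results out) := by unfold Spec_get_related_objects; infer_instance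

-- ===== CLAIM (what is proved, stated in full; the proofs are below) =====
def Claim_equal_get_related_objects : Prop := ∀ (obj_name : String) (analysis_results : List (String × List (String × List (List (String × String))))), Dom_get_related_objects obj_name analysis_results → Pre_get_related_objects obj_name analysis_results → Spec_get_related_objects obj_name analysis_results (get_related_objects obj_name analysis_results)

-- ===== LEMMAS AND PROOFS =====
-- abbreviations used only by the proofs
def pvCode (kpi : List (String × String)) : String := (PySem.Dict.ofList kpi).getD "code" ""
def pvKpisL (data : List (String × List (List (String × String)))) : List (List (String × String)) :=
  (PySem.Dict.ofList data).getD "kpis" []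
def pvCodesL (data : List (String × List (List (String × String)))) : List String :=
  (pvKpisL data).map pvCode

theorem kpiCodes_eq (data : List (String × List (List (String × String)))) :
    kpiCodes data = PySem.Set.ofList (pvCodesL data) := rfl

-- ===== A side =====
theorem memA (obj_name : String) (obj_kpis : PySem.Set String)
    (l : List (String × List (String × List (List (String × String)))))
    (s : PySem.Set String) (x : String) :
    (x ∈ l.foldl (fun related p =>
        if p.1 ≠ obj_name then
          if PySem.Set.inter obj_kpis (kpiCodes p.2) = [] then related
          else PySem.Set.add related p.1
        else related) s)
    ↔ x ∈ s ∨ ∃ p ∈ l, p.1 = x ∧ x ≠ obj_name ∧ PySem.Set.inter obj_kpis (kpiCodes p.2) ≠ [] := by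
  induction l generalizing s with
  | nil => simp
  | cons p t ih =>
    simp only [List.foldl_cons]
    split_ifs with h1 h2
    · rw [ih]; simp only [List.mem_cons]; aesop
    · rw [ih]; simp only [PySem.Set.mem_add, List.mem_cons]; aesop
    · rw [ih]; simp only [List.mem_cons]; aesop

theorem nodupA (obj_name : String) (obj_kpis : PySem.Set String)
    (l : List (String × List (String × List (List (String × String)))))
    (s : PySem.Set String) (hs : s.Nodup) :
    (l.foldl (fun related p =>
        if p.1 ≠ obj_name then
          if PySem.Set.inter obj_kpis (kpiCodes p.2) = [] then related
          else PySem.Set.add related p.1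
        else related) s).Nodup := by
  induction l generalizing s with
  | nil => exact hs
  | cons p t ih =>
    simp only [List.foldl_cons]
    split_ifs <;> [exact ih s hs; exact ih _ (PySem.Set.nodup_add _ _ hs); exact ih s hs]

-- ===== B side =====
theorem mem_inner (l : List (List (String × String))) (obj : String)
    (idx : PySem.Dict String (PySem.Set String)) (c x : String) :
    (x ∈ (l.foldl (fun idx kpi =>
        idx.modify ((PySem.Dict.ofList kpi).getD "code" "") []
          (fun s => PySem.Set.add s obj)) idx).getD c [])
    ↔ x ∈ idx.getD c [] ∨ (x = obj ∧ c ∈ l.map pvCode) := by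
  induction l generalizing idx with
  | nil => simp
  | cons kpi t ih =>
    simp only [List.foldl_cons]
    rw [ih, PySem.Dict.getD_modify]
    by_cases hc : c = (PySem.Dict.ofList kpi).getD "code" "" <;>
      simp only [hc, if_pos, List.map_cons, List.mem_cons, PySem.Set.mem_add, pvCode] <;>
      aesop

theorem mem_index (l : List (String × List (String × List (List (String × String)))))
    (idx : PySem.Dict String (PySem.Set String)) (c x : String) :
    (x ∈ (l.foldl (fun idx p =>
        ((PySem.Dict.ofList p.2).getD "kpis" []).foldl
          (fun idx kpi =>
            idx.modify ((PySem.Dict.ofList kpi).getD "code" "") []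
              (fun s => PySem.Set.add s p.1)) idx) idx).getD c [])
    ↔ x ∈ idx.getD c [] ∨ ∃ p ∈ l, p.1 = x ∧ c ∈ pvCodesL p.2 := by
  induction l generalizing idx with
  | nil => simp
  | cons p t ih =>
    simp only [List.foldl_cons]
    rw [ih, mem_inner]
    simp only [List.mem_cons, pvCodesL, pvKpisL]
    aesop

theorem mem_unions (l : List (List (String × String)))
    (index : PySem.Dict String (PySem.Set String)) (s : PySem.Set String) (x : String) :
    (x ∈ l.foldl (fun rel kpi =>
        PySem.Set.union rel (index.getD ((PySem.Dict.ofList kpi).getD "code" "") [])) s)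
    ↔ x ∈ s ∨ ∃ kpi ∈ l, x ∈ index.getD (pvCode kpi) [] := by
  induction l generalizing s with
  | nil => simp
  | cons kpi t ih =>
    simp only [List.foldl_cons]
    rw [ih]
    simp only [PySem.Set.mem_union, List.mem_cons, pvCode]
    aesop

theorem nodup_unions (l : List (List (String × String)))
    (index : PySem.Dict String (PySem.Set String)) (s : PySem.Set String) (hs : s.Nodup) :
    (l.foldl (fun rel kpi =>
        PySem.Set.union rel (index.getD ((PySem.Dict.ofList kpi).getD "code" "") [])) s).Nodup := by
  induction l generalizing s with
  | nil => exact hs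
  | cons kpi t ih => exact ih _ (PySem.Set.nodup_union _ _ hs)

-- ===== VERDICT (by name: the statement is the Claim_ definition above) =====
theorem get_related_objects_spec : Claim_equal_get_related_objects := by
  intro obj_name ar _hdom hpre
  unfold Spec_get_related_objects get_related_objects get_related_objects_alt
  by_cases hc : (PySem.Dict.ofList ar).contains obj_name = false
  · simp [hc]
  · simp only [Bool.not_eq_false] at hc
    simp only [hc, Bool.true_eq_false, if_false]
    -- both sides: sorted of a Nodup list, take 20; show the two Nodup lists are a Perm
    apply congrArg (List.take 20)
    apply PySem.List.sorted_eq_sorted_of_perm _ _ _ (fun a b h => h)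
    refine (List.perm_ext_iff_of_nodup (nodupA _ _ _ _ List.nodup_nil)
      (PySem.Set.nodup_discard _ _ (nodup_unions _ _ _ List.nodup_nil))).mpr ?_
    intro x
    rw [memA, PySem.Set.mem_discard, mem_unions]
    simp only [List.not_mem_nil, false_or]
    constructor
    · rintro ⟨p, hp, rfl, hne, hint⟩
      refine ⟨?_, hne⟩
      obtain ⟨c, hcmem⟩ := List.exists_mem_of_ne_nil _ hint
      rw [PySem.Set.mem_inter] at hcmem
      obtain ⟨hc1, hc2⟩ := hcmem
      rw [kpiCodes_eq, PySem.Set.mem_ofList] at hc1 hc2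
      simp only [pvCodesL, List.mem_map] at hc1
      obtain ⟨kpi, hkpi, rfl⟩ := hc1
      simp only [pvKpisL] at hkpi
      refine ⟨kpi, hkpi, ?_⟩
      rw [mem_index]
      simp only [PySem.Dict.getD_empty, List.not_mem_nil, false_or]
      exact ⟨p, hp, rfl, hc2⟩
    · rintro ⟨⟨kpi, hkpi, hx⟩, hne⟩
      rw [mem_index] at hx
      simp only [PySem.Dict.getD_empty, List.not_mem_nil, false_or] at hx
      obtain ⟨p, hp, rfl, hcp⟩ := hx
      refine ⟨p, hp, rfl, hne, fun hnil => ?_⟩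
      have hm : pvCode kpi ∈ PySem.Set.inter (kpiCodes ((PySem.Dict.ofList ar).getD obj_name [])) (kpiCodes p.2) := by
        rw [PySem.Set.mem_inter, kpiCodes_eq, kpiCodes_eq, PySem.Set.mem_ofList, PySem.Set.mem_ofList]
        refine ⟨?_, hcp⟩
        simp only [pvCodesL, List.mem_map, pvKpisL]
        exact ⟨kpi, hkpi, rfl⟩
      rw [hnil] at hm
      exact List.not_mem_nil hm
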